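-- pv_equiv track=rewrite | github.com/whsalex/perf-log-analyse | namedtree.py | _get_key_set
-- ===== SOURCE A (Python) =====
-- def _get_key_set(t_list):
--     key_uset = set()
--     for l in t_list:
--         key_uset |= l.keys()
--
--     key_iset = key_uset
--     for l in t_list:
--         key_iset &= l.keys()
--
--     key_dset = key_uset - key_iset
--     return key_uset, key_iset, key_dset
-- ===== SOURCE B (Python) =====
-- def _get_key_set(t_list):
--     if not t_list:
--         return set(), set(), set()
--     key_uset = {k for l in t_list for k in l}
--     key_iset = {k for k in t_list[0] if all(k in l for l in t_list[1:])}
--     return key_uset, key_iset, key_uset - key_iset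
-- ===== Notes on version B (the rewrite author's own statement) =====
-- stated objective: simpler
-- what changed: Instead of folding set-union and set-intersection operations over the whole list twice, B computes each result directly: the union as one comprehension over all keys, and the intersection by testing each key of the first dict for membership in all remaining dicts (empty input handled by an early return); a timing run measured this constant-factor faster because the intersection touches only the first dict's keys with short-circuiting all() and no intermediate set objects are built per dict.
import Mathlib
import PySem

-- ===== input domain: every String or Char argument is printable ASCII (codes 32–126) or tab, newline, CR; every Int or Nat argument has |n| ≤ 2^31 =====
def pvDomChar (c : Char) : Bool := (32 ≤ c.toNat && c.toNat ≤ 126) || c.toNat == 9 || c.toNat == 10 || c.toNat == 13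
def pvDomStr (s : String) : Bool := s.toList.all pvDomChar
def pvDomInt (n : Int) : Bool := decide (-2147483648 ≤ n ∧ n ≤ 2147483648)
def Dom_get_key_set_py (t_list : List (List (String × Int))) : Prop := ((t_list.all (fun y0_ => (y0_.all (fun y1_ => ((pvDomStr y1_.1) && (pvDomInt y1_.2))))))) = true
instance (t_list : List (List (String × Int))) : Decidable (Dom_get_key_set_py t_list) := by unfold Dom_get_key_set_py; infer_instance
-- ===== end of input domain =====

-- B drops A's iterative set algebra: the union is one comprehension over all keys, and the
-- intersection is built directly from the first dict's keys by an all-dicts membership test.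

-- ===== PORT A =====
def get_key_set_py (t_list : List (List (String × Int))) : List String × List String × List String :=
  let key_uset : PySem.Set String :=
    t_list.foldl (fun s l => PySem.Set.update s (l.map (·.1))) PySem.Set.empty
  let key_iset : PySem.Set String :=
    t_list.foldl (fun s l => PySem.Set.inter s (l.map (·.1))) key_uset
  let key_dset := PySem.Set.diff key_uset key_iset
  (key_uset, key_iset, key_dset)

-- ===== PORT B =====
def get_key_set_py_alt (t_list : List (List (String × Int))) : List String × List String × List String :=
  match t_list with
  | [] => ([], [], [])
  | t0 :: rest =>
    let key_uset : PySem.Set String :=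
      PySem.Set.ofList ((t0 :: rest).flatMap (fun l => l.map (·.1)))
    let key_iset : PySem.Set String :=
      PySem.Set.ofList ((t0.map (·.1)).filter
        (fun k => rest.all (fun l => (l.map (·.1)).contains k)))
    (key_uset, key_iset, PySem.Set.diff key_uset key_iset)

-- ===== PRECONDITION & SPEC =====
def Spec_get_key_set_py (t_list : List (List (String × Int))) (out : List String × List String × List String) : Prop := out = get_key_set_py_alt t_list
instance (t_list : List (List (String × Int))) (out : List String × List String × List String) : Decidable (Spec_get_key_set_py t_list out) := by unfold Spec_get_key_set_py; infer_instance

-- ===== CLAIM (what is proved, stated in full; the proofs are below) =====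
def Claim_equal_get_key_set_py : Prop := ∀ (t_list : List (List (String × Int))), Dom_get_key_set_py t_list → Spec_get_key_set_py t_list (get_key_set_py t_list)

-- ===== LEMMAS AND PROOFS =====

-- A's union fold is set(concatenation of all key lists)
theorem pv_union_fold (ls : List (List (String × Int))) :
    ∀ (s : PySem.Set String),
    ls.foldl (fun s l => PySem.Set.update s (l.map (·.1))) s
      = PySem.Set.update s (ls.flatMap (fun l => l.map (·.1))) := by
  induction ls with
  | nil => intro s; rfl
  | cons l rest ih =>
    intro s
    rw [List.foldl_cons, ih, List.flatMap_cons, PySem.Set.update_append]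

-- A's intersection fold filters the accumulator by membership in every dict's keys
theorem pv_inter_fold (ls : List (List (String × Int))) :
    ∀ (s : PySem.Set String),
    ls.foldl (fun s l => PySem.Set.inter s (l.map (·.1))) s
      = s.filter (fun x => ls.all (fun l => (l.map (·.1)).contains x)) := by
  induction ls with
  | nil => intro s; simp
  | cons l rest ih =>
    intro s
    rw [List.foldl_cons]
    show rest.foldl _ (List.filter _ s) = _
    rw [ih, List.filter_filter]
    simp [Bool.and_comm]

-- set() commutes with a filter
theorem pv_ofList_filter (p : String → Bool) (xs : List String) :
    PySem.Set.ofList (xs.filter p) = (PySem.Set.ofList xs).filter p := by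
  induction xs with
  | nil => rfl
  | cons x xs ih =>
    by_cases hp : p x
    · rw [List.filter_cons_of_pos hp, PySem.Set.ofList_cons, PySem.Set.ofList_cons,
        List.filter_cons_of_pos hp, ih]
      simp only [PySem.Set.discard]
      rw [List.filter_filter, List.filter_filter]
      simp [Bool.and_comm]
    · rw [List.filter_cons_of_neg hp, PySem.Set.ofList_cons, List.filter_cons_of_neg hp, ih]
      simp only [PySem.Set.discard]
      rw [List.filter_filter]
      congr 1
      funext y
      by_cases hy : y = x
      · subst hy; simp [hp]
      · simp [hy]

-- ===== VERDICT (by name: the statement is the Claim_ definition above) =====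
theorem get_key_set_py_spec : Claim_equal_get_key_set_py := by
  intro t_list _
  unfold Spec_get_key_set_py get_key_set_py get_key_set_py_alt
  cases t_list with
  | nil => rfl
  | cons t0 rest =>
    simp only []
    have hU : (t0 :: rest).foldl (fun s l => PySem.Set.update s (l.map (·.1))) PySem.Set.empty
        = PySem.Set.ofList ((t0 :: rest).flatMap (fun l => l.map (·.1))) := by
      rw [pv_union_fold]; rfl
    have hI : (t0 :: rest).foldl (fun s l => PySem.Set.inter s (l.map (·.1)))
        (PySem.Set.ofList ((t0 :: rest).flatMap (fun l => l.map (·.1))))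
        = PySem.Set.ofList ((t0.map (·.1)).filter
            (fun k => rest.all (fun l => (l.map (·.1)).contains k))) := by
      rw [pv_inter_fold, pv_ofList_filter]
      rw [List.flatMap_cons, PySem.Set.ofList_append,
        PySem.Set.update_eq_append_filter, List.filter_append]
      have h1 : List.filter (fun x => (t0 :: rest).all fun l => (l.map (·.1)).contains x)
            (PySem.Set.ofList (t0.map (·.1)))
          = List.filter (fun k => rest.all fun l => (l.map (·.1)).contains k)
            (PySem.Set.ofList (t0.map (·.1))) := by
        apply List.filter_congr
        intro x hx
        have hx' : x ∈ t0.map (·.1) := (PySem.Set.mem_ofList _ _).mp hx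
        have hc : (t0.map (·.1)).contains x = true := by
          simpa [List.contains_iff_mem] using hx'
        show ((t0 :: rest).all fun l => (l.map (·.1)).contains x)
            = (rest.all fun l => (l.map (·.1)).contains x)
        rw [List.all_cons, hc, Bool.true_and]
      have h2 : List.filter (fun x => (t0 :: rest).all fun l => (l.map (·.1)).contains x)
            (List.filter (fun y => !(PySem.Set.ofList (t0.map (·.1))).contains y)
              (PySem.Set.ofList (rest.flatMap (fun l => l.map (·.1))))) = [] := by
        rw [List.filter_filter]
        apply List.filter_eq_nil_iff.mpr
        intro x hx
        simp only [List.all_cons, Bool.and_eq_true, Bool.not_eq_true']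
        intro h
        have hmem : x ∈ t0.map (·.1) := by
          have := h.1.1
          simpa [List.contains_iff_mem] using this
        have hnot : ¬ x ∈ PySem.Set.ofList (t0.map (·.1)) := by
          simpa [List.contains_iff_mem] using h.2
        exact hnot ((PySem.Set.mem_ofList _ _).mpr hmem)
      rw [h1, h2, List.append_nil]
    rw [hU, hI]
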